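-- pv_equiv track=rewrite | github.com/MrBrantCode/unitest_baseline | mut_generate/mist_train_cf/cf_47910/solution.py | longestStringInRange
-- ===== SOURCE A (Python) =====
-- import heapq
--
-- def longestStringInRange(text_arr, k1, k2):
--     if not text_arr or k1 > k2 or k1 < 0 or k2 < 0:
--         return None  # handle edge cases of invalid input
--
--     # Use a heap to keep least very lengthy texts as of now
--     heap = [(-len(s), s) for s in text_arr if k1 <= len(s) <= k2]
--     heapq.heapify(heap)
--
--     if not heap:
--         return None  # if no string fall into the range of k1 to k2
--
--     return heapq.heappop(heap)[1]  # return the textual element with most length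
-- ===== SOURCE B (Python) =====
-- def longestStringInRange(text_arr, k1, k2):
--     if not text_arr or k1 > k2 or k1 < 0 or k2 < 0:
--         return None
--     best = None
--     for s in text_arr:
--         if k1 <= len(s) <= k2:
--             if best is None or len(s) > len(best) or (len(s) == len(best) and s < best):
--                 best = s
--     return best
-- ===== Notes on version B (the rewrite author's own statement) =====
-- stated objective: simpler
-- what changed: Replaced building a list of (-len, s) key tuples, heapifying it and popping the minimum with a single pass keeping a running best string (longer wins, lex-smaller breaks ties).
import Mathlib
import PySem

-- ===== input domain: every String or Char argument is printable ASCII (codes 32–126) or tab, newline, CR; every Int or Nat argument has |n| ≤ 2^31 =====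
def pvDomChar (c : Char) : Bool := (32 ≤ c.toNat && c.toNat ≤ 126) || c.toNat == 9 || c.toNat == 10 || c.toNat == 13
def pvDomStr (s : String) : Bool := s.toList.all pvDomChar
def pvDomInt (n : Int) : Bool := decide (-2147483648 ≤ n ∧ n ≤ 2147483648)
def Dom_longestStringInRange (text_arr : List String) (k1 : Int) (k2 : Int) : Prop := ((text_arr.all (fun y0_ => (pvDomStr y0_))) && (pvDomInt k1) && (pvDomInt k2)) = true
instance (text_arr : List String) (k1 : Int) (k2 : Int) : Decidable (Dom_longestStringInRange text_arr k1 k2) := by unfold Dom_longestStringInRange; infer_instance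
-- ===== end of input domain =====

-- B replaces A's heap of (-len, s) key tuples with a single running-best scan (simpler); return values proved equal on all inputs.

-- ===== PORT A =====
-- heapq.heapify + heappop select the minimum tuple of the list under Python's
-- lexicographic tuple order; ported as PySem.List.min2? (first extremal element —
-- exact here, since equal keys (-len s, s) force equal elements).
def longestStringInRange (text_arr : List String) (k1 : Int) (k2 : Int) : Option String :=
  if text_arr = [] ∨ k1 > k2 ∨ k1 < 0 ∨ k2 < 0 then
    none
  else
    let heap : List (Int × String) :=
      (text_arr.filter (fun s => decide (k1 ≤ PySem.Str.len s) && decide (PySem.Str.len s ≤ k2))).map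
        (fun s => (-(PySem.Str.len s), s))
    match PySem.List.min2? heap (fun p => p.1) (fun p => p.2) with
    | none => none
    | some p => some p.2

-- ===== PORT B =====
def lsirStep (k1 k2 : Int) (best : Option String) (s : String) : Option String :=
  if k1 ≤ PySem.Str.len s ∧ PySem.Str.len s ≤ k2 then
    match best with
    | none => some s
    | some b =>
        if PySem.Str.len b < PySem.Str.len s ∨ (PySem.Str.len s = PySem.Str.len b ∧ s < b) then
          some s
        else
          some b
  else best

def longestStringInRange_alt (text_arr : List String) (k1 : Int) (k2 : Int) : Option String :=
  if text_arr = [] ∨ k1 > k2 ∨ k1 < 0 ∨ k2 < 0 then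
    none
  else
    text_arr.foldl (lsirStep k1 k2) none

-- ===== PRECONDITION & SPEC =====
def Spec_longestStringInRange (text_arr : List String) (k1 : Int) (k2 : Int) (out : Option String) : Prop := out = longestStringInRange_alt text_arr k1 k2
instance (text_arr : List String) (k1 : Int) (k2 : Int) (out : Option String) : Decidable (Spec_longestStringInRange text_arr k1 k2 out) := by unfold Spec_longestStringInRange; infer_instance

-- ===== CLAIM (what is proved, stated in full; the proofs are below) =====
def Claim_equal_longestStringInRange : Prop := ∀ (text_arr : List String) (k1 : Int) (k2 : Int), Dom_longestStringInRange text_arr k1 k2 → Spec_longestStringInRange text_arr k1 k2 (longestStringInRange text_arr k1 k2)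

-- ===== LEMMAS AND PROOFS =====

-- A's tuple-minimum over the filtered, (-len, s)-tagged list tracks B's running-best fold
-- over the raw list; proved by right-to-left induction so the two accumulators stay related
-- by tagging with (-len, ·).
theorem lsir_min2_eq (k1 k2 : Int) (l : List String) :
    PySem.List.min2?
      ((l.filter (fun s => decide (k1 ≤ PySem.Str.len s) && decide (PySem.Str.len s ≤ k2))).map
        (fun s => (-(PySem.Str.len s), s)))
      (fun p => p.1) (fun p => p.2)
    = (l.foldl (lsirStep k1 k2) none).map (fun s => (-(PySem.Str.len s), s)) := by
  induction l using List.reverseRecOn with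
  | nil => rfl
  | append_singleton t x ih =>
    rw [List.filter_append, List.map_append, List.foldl_append]
    unfold PySem.List.min2? at ih ⊢
    rw [List.foldl_append, ih]
    by_cases hx : k1 ≤ PySem.Str.len x ∧ PySem.Str.len x ≤ k2
    · have hfx : (decide (k1 ≤ PySem.Str.len x) && decide (PySem.Str.len x ≤ k2)) = true := by
        simpa using hx
      simp only [List.filter_cons, List.filter_nil, hfx, if_true, List.map_cons, List.map_nil,
        List.foldl_cons, List.foldl_nil]
      cases hacc : t.foldl (lsirStep k1 k2) none with
      | none =>
        have hx' : k1 ≤ (x.length : Int) ∧ (x.length : Int) ≤ k2 := by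
          simp only [PySem.Str.len, String.length_toList] at hx
          exact hx
        simp [lsirStep, hx'.1, hx'.2]
      | some b =>
        simp only [Option.map_some, lsirStep]
        rw [if_pos hx]
        by_cases hlt : PySem.Str.len b < PySem.Str.len x
        · have h1 : ((-(PySem.Str.len x)) < -(PySem.Str.len b)) := by omega
          have h3 : b.length < x.length := by
            simp only [PySem.Str.len, String.length_toList] at hlt
            omega
          simp [h1, h3]
        · by_cases heq : PySem.Str.len x = PySem.Str.len b
          · have h1 : ¬ ((-(PySem.Str.len x)) < -(PySem.Str.len b)) := by omega
            have h2 : ¬ ((-(PySem.Str.len b)) < -(PySem.Str.len x)) := by omega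
            have hl : x.length = b.length := by
              simp only [PySem.Str.len, String.length_toList] at heq
              omega
            by_cases hs : x < b
            · simp [h1, h2, hs, hl]
            · simp [h1, h2, hs, hl]
          · have h1 : ¬ ((-(PySem.Str.len x)) < -(PySem.Str.len b)) := by omega
            have h2 : ((-(PySem.Str.len b)) < -(PySem.Str.len x)) := by omega
            have h3 : x.length < b.length := by
              simp only [PySem.Str.len, String.length_toList] at hlt heq
              omega
            have c1 : ¬ b.length < x.length := by omega
            have c2 : ¬ b.length ≤ x.length := by omega
            have c3 : ¬ x.length = b.length := by omega
            simp [h1, h2, c1, c2, c3]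
    · have hfx : (decide (k1 ≤ PySem.Str.len x) && decide (PySem.Str.len x ≤ k2)) = false := by
        by_cases h1 : k1 ≤ PySem.Str.len x
        · have h2 : ¬ PySem.Str.len x ≤ k2 := fun h => hx ⟨h1, h⟩
          simp only [PySem.Str.len, String.length_toList] at h2
          simp [PySem.Str.len]
          omega
        · simp only [PySem.Str.len, String.length_toList] at h1
          simp [PySem.Str.len]
          omega
      simp only [List.filter_cons, List.filter_nil, hfx, if_false, List.map_nil, List.foldl_nil,
        List.foldl_cons]
      have hskip : lsirStep k1 k2 (t.foldl (lsirStep k1 k2) none) x = t.foldl (lsirStep k1 k2) none := by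
        unfold lsirStep; rw [if_neg hx]
      simp [hskip]

-- ===== VERDICT (by name: the statement is the Claim_ definition above) =====
theorem longestStringInRange_spec : Claim_equal_longestStringInRange := by
  intro text_arr k1 k2 _
  unfold Spec_longestStringInRange longestStringInRange longestStringInRange_alt
  by_cases hg : text_arr = [] ∨ k1 > k2 ∨ k1 < 0 ∨ k2 < 0
  · simp [hg]
  · simp only [hg, if_false]
    rw [lsir_min2_eq k1 k2 text_arr]
    cases text_arr.foldl (lsirStep k1 k2) none <;> simp
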